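-- pv_equiv track=rewrite | github.com/unslothai/unsloth | studio/backend/utils/hardware/vram_estimation.py | _lora_mlp_elements
-- ===== SOURCE A (Python) =====
-- def _lora_mlp_elements(
--     hd: int,
--     mlp_size: int,
--     r: int,
--     target_modules: list,
--     expert_mult: int,
-- ) -> int:
--     module_ab = {
--         "gate_proj": (hd * r, r * mlp_size),
--         "up_proj": (hd * r, r * mlp_size),
--         "down_proj": (mlp_size * r, r * hd),
--     }
--     total = 0
--     for name, (a, b) in module_ab.items():
--         if name in target_modules:
--             total += (a + b) * expert_mult
--     return total
-- ===== SOURCE B (Python) =====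
-- def _lora_mlp_elements(
--     hd: int,
--     mlp_size: int,
--     r: int,
--     target_modules: list,
--     expert_mult: int,
-- ) -> int:
--     n = len({"gate_proj", "up_proj", "down_proj"} & set(target_modules))
--     return n * r * (hd + mlp_size) * expert_mult
-- ===== Notes on version B (the rewrite author's own statement) =====
-- stated objective: simpler
-- what changed: Every matching module contributes the same r*(hd+mlp_size)*expert_mult, so B counts the distinct matching module names via set intersection and multiplies, replacing A's per-module dict and accumulation loop by a closed form.
import Mathlib
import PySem

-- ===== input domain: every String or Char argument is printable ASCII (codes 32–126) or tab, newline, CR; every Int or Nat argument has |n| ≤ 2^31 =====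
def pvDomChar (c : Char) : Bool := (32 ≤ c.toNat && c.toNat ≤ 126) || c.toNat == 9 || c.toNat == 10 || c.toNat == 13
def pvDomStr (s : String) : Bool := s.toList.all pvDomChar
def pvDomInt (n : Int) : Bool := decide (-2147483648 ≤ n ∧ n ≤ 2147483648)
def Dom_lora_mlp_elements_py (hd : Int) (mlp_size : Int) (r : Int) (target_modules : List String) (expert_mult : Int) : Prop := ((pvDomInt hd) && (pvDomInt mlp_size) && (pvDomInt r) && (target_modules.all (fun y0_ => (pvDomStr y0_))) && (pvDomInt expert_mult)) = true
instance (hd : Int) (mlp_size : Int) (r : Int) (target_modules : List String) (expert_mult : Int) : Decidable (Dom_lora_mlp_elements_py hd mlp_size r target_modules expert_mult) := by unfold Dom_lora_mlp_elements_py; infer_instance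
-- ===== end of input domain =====

-- ===== PORT A =====
-- B replaces A's per-module dict + accumulation loop with a closed-form count-and-multiply (objective: simpler).
def lora_mlp_elements_py (hd : Int) (mlp_size : Int) (r : Int) (target_modules : List String) (expert_mult : Int) : Int :=
  let module_ab : PySem.Dict String (Int × Int) :=
    (((PySem.Dict.empty.insert "gate_proj" (hd * r, r * mlp_size)).insert
        "up_proj" (hd * r, r * mlp_size)).insert
        "down_proj" (mlp_size * r, r * hd))
  module_ab.items.foldl
    (fun total nab =>
      if nab.1 ∈ target_modules then total + (nab.2.1 + nab.2.2) * expert_mult else total) 0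

-- ===== PORT B =====
def lora_mlp_elements_py_alt (hd : Int) (mlp_size : Int) (r : Int) (target_modules : List String) (expert_mult : Int) : Int :=
  let n : Int := ((["gate_proj", "up_proj", "down_proj"].filter
      (fun name => name ∈ target_modules)).length : Int)
  n * r * (hd + mlp_size) * expert_mult

-- ===== PRECONDITION & SPEC =====
def Spec_lora_mlp_elements_py (hd : Int) (mlp_size : Int) (r : Int) (target_modules : List String) (expert_mult : Int) (out : Int) : Prop := out = lora_mlp_elements_py_alt hd mlp_size r target_modules expert_mult
instance (hd : Int) (mlp_size : Int) (r : Int) (target_modules : List String) (expert_mult : Int) (out : Int) : Decidable (Spec_lora_mlp_elements_py hd mlp_size r target_modules expert_mult out) := by unfold Spec_lora_mlp_elements_py; infer_instance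

-- ===== CLAIM (what is proved, stated in full; the proofs are below) =====
def Claim_equal_lora_mlp_elements_py : Prop := ∀ (hd : Int) (mlp_size : Int) (r : Int) (target_modules : List String) (expert_mult : Int), Dom_lora_mlp_elements_py hd mlp_size r target_modules expert_mult → Spec_lora_mlp_elements_py hd mlp_size r target_modules expert_mult (lora_mlp_elements_py hd mlp_size r target_modules expert_mult)

-- ===== LEMMAS AND PROOFS =====

-- ===== VERDICT (by name: the statement is the Claim_ definition above) =====
theorem lora_mlp_elements_py_spec : Claim_equal_lora_mlp_elements_py := by
  intro hd mlp_size r target_modules expert_mult _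
  unfold Spec_lora_mlp_elements_py lora_mlp_elements_py lora_mlp_elements_py_alt
  by_cases h1 : "gate_proj" ∈ target_modules <;>
    by_cases h2 : "up_proj" ∈ target_modules <;>
      by_cases h3 : "down_proj" ∈ target_modules <;>
        simp [PySem.Dict.insert, PySem.Dict.empty, List.filter, h1, h2, h3] <;>
        (first | exact Or.inl (by ring) | ring)
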